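-- pv_equiv track=rewrite | github.com/freean2468/programmers | Lv.1/모의고사/solution.py | solution
-- ===== SOURCE A (Python) =====
-- def solution(answers):
--     f = [1,2,3,4,5]
--     s = [2,1,2,3,2,4,2,5]
--     t = [3,3,1,1,2,2,4,4,5,5]
--     correct = [0, 0, 0]
--
--     for i, a in enumerate(answers):
--         if f[i % len(f)] == a:
--             correct[0] += 1
--         if s[i % len(s)] == a:
--             correct[1] += 1
--         if t[i % len(t)] == a:
--             correct[2] += 1
--
--     m = max(correct)
--
--     return [i + 1 for i, c in enumerate(correct) if c == m]
-- ===== SOURCE B (Python) =====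
-- def solution(answers):
--     f = [1, 2, 3, 4, 5]
--     s = [2, 1, 2, 3, 2, 4, 2, 5]
--     t = [3, 3, 1, 1, 2, 2, 4, 4, 5, 5]
--     # Different data structure: build a histogram keyed by (position mod 40, answer)
--     # once (40 = lcm of the three pattern lengths, so every pattern is constant on a
--     # residue class mod 40); each score is then 40 dictionary lookups, with no
--     # per-answer comparison against any pattern.
--     hist = {}
--     for i, a in enumerate(answers):
--         key = (i % 40, a)
--         hist[key] = hist.get(key, 0) + 1
--     correct = [sum(hist.get((r, pat[r % len(pat)]), 0) for r in range(40))
--                for pat in (f, s, t)]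
--     m = max(correct)
--     return [i + 1 for i, c in enumerate(correct) if c == m]
-- ===== Notes on version B (the rewrite author's own statement) =====
-- stated objective: alternative
-- what changed: Replaces per-answer comparison against the three cyclic patterns by a residue histogram: one pass builds a dict counting (i mod 40, answer) pairs (40 = lcm of the pattern lengths), and each pattern's score is read off with 40 dictionary lookups, so no pattern element is ever compared to an answer element.
import Mathlib
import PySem

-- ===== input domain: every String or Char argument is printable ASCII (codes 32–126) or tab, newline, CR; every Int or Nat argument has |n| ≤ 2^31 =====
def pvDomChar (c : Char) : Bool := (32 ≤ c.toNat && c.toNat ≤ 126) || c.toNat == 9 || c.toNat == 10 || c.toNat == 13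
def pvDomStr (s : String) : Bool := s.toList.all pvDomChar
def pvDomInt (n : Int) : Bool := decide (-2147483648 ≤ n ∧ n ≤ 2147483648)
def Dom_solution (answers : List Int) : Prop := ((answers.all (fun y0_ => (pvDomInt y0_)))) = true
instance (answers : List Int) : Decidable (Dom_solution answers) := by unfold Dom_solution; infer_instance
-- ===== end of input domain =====

-- B replaces A's per-answer comparisons against three cyclic patterns by a residue histogram keyed by (i mod 40, answer), built once and read back with 40 lookups per pattern (alternative structure, same cost).


-- the three answer patterns (module constants shared by both ports)
def patF : List Int := [1, 2, 3, 4, 5]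
def patS : List Int := [2, 1, 2, 3, 2, 4, 2, 5]
def patT : List Int := [3, 3, 1, 1, 2, 2, 4, 4, 5, 5]

-- ===== PORT A =====
-- loop body of A: the three 'if pat[i % len(pat)] == a: correct[k] += 1' updates
-- (pyGetD is exact here: the index i % len(pat) is always in range, so Python never raises)
def stepA (c : Int × Int × Int) (p : Int × Int) : Int × Int × Int :=
  let c0 := if PySem.List.pyGetD patF (PySem.Int.mod p.1 (patF.length : Int)) 0 = p.2 then c.1 + 1 else c.1
  let c1 := if PySem.List.pyGetD patS (PySem.Int.mod p.1 (patS.length : Int)) 0 = p.2 then c.2.1 + 1 else c.2.1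
  let c2 := if PySem.List.pyGetD patT (PySem.Int.mod p.1 (patT.length : Int)) 0 = p.2 then c.2.2 + 1 else c.2.2
  (c0, c1, c2)

def solution (answers : List Int) : List Int :=
  let c := (PySem.List.enumerate answers 0).foldl stepA (0, 0, 0)
  let correct := [c.1, c.2.1, c.2.2]
  let m := (PySem.List.max? correct (fun x => x)).getD 0    -- max(correct); list is nonempty, so getD default unreachable
  (PySem.List.enumerate correct 0).filterMap (fun p => if p.2 = m then some (p.1 + 1) else none)

-- ===== PORT B =====
-- hist[key] = hist.get(key, 0) + 1 over key = (i % 40, a)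
def histB (answers : List Int) : PySem.Dict (Int × Int) Int :=
  (PySem.List.enumerate answers 0).foldl
    (fun d p => d.insert (PySem.Int.mod p.1 40, p.2) (d.getD (PySem.Int.mod p.1 40, p.2) 0 + 1))
    PySem.Dict.empty

def solution_alt (answers : List Int) : List Int :=
  let hist := histB answers
  -- sum(hist.get((r, pat[r % len(pat)]), 0) for r in range(40))
  let correct := [patF, patS, patT].map (fun pat =>
    ((PySem.List.pyRange 0 40 1).map (fun r =>
      hist.getD (r, PySem.List.pyGetD pat (PySem.Int.mod r (pat.length : Int)) 0) 0)).sum)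
  let m := (PySem.List.max? correct (fun x => x)).getD 0
  (PySem.List.enumerate correct 0).filterMap (fun p => if p.2 = m then some (p.1 + 1) else none)

-- ===== PRECONDITION & SPEC =====
def Spec_solution (answers : List Int) (out : List Int) : Prop := out = solution_alt answers
instance (answers : List Int) (out : List Int) : Decidable (Spec_solution answers out) := by unfold Spec_solution; infer_instance

-- ===== CLAIM (what is proved, stated in full; the proofs are below) =====
def Claim_equal_solution : Prop := ∀ (answers : List Int), Dom_solution answers → Spec_solution answers (solution answers)

-- ===== LEMMAS AND PROOFS =====

-- cyclic count: number of positions where xs matches pat read cyclically from offset k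
def cyc (pat : List Int) : Nat → List Int → Int
  | _, [] => 0
  | k, a :: r => (if pat.getD k 0 = a then 1 else 0) + cyc pat ((k + 1) % pat.length) r

lemma mod_natCast_num (n : Nat) (L : Nat) (hL : 0 < L) :
    PySem.Int.mod (n : Int) (L : Int) = ((n % L : Nat) : Int) := by
  rw [PySem.Int.mod_eq_emod_of_pos (by exact_mod_cast hL)]
  omega

lemma foldA_eq (xs : List Int) : ∀ (n : Nat) (c : Int × Int × Int),
    (PySem.List.enumerate xs (n : Int)).foldl stepA c
      = (c.1 + cyc patF (n % 5) xs, c.2.1 + cyc patS (n % 8) xs, c.2.2 + cyc patT (n % 10) xs) := by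
  induction xs with
  | nil => intro n c; simp [PySem.List.enumerate_nil, cyc]
  | cons a r ih =>
    intro n c
    rw [PySem.List.enumerate_cons]
    have hn1 : (n : Int) + 1 = ((n + 1 : Nat) : Int) := by push_cast; ring
    simp only [List.foldl_cons, hn1, ih]
    simp only [stepA,
      mod_natCast_num n patF.length (by decide), mod_natCast_num n patS.length (by decide),
      mod_natCast_num n patT.length (by decide), PySem.List.pyGetD_natCast]
    have h5 : (n + 1) % 5 = (n % 5 + 1) % 5 := by omega
    have h8 : (n + 1) % 8 = (n % 8 + 1) % 8 := by omega
    have h10 : (n + 1) % 10 = (n % 10 + 1) % 10 := by omega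
    show _ = (c.1 + cyc patF (n % 5) (a :: r), c.2.1 + cyc patS (n % 8) (a :: r),
              c.2.2 + cyc patT (n % 10) (a :: r))
    simp only [cyc, h5, h8, h10]
    have lF : patF.length = 5 := by decide
    have lS : patS.length = 8 := by decide
    have lT : patT.length = 10 := by decide
    rw [lF, lS, lT]
    simp only [Prod.mk.injEq]
    refine ⟨?_, ?_, ?_⟩ <;> (split_ifs <;> ring)

-- the histogram fold is the counting fold over the mapped key list
lemma foldl_key (l : List (Int × Int)) :
    ∀ (d : PySem.Dict (Int × Int) Int),
      l.foldl (fun d p => d.insert (PySem.Int.mod p.1 40, p.2)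
                (d.getD (PySem.Int.mod p.1 40, p.2) 0 + 1)) d
        = (l.map (fun p => (PySem.Int.mod p.1 40, p.2))).foldl
            (fun d k => d.insert k (d.getD k 0 + 1)) d := by
  induction l with
  | nil => intro d; simp
  | cons p l' ih => intro d; simp only [List.foldl_cons, List.map_cons, ih]

-- getD on the histogram is a count of the mapped key list
lemma histB_getD (answers : List Int) (v : Int × Int) :
    (histB answers).getD v 0
      = (((PySem.List.enumerate answers 0).map
            (fun p => (PySem.Int.mod p.1 40, p.2))).count v : Int) := by
  unfold histB
  rw [foldl_key (PySem.List.enumerate answers 0) PySem.Dict.empty,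
      PySem.Dict.getD_foldl_insert_add_one]
  simp

-- sum over R of the indicator "k = (r, g r)" is 0 when k.1 ∉ R
lemma sum_ind_zero (g : Int → Int) (k : Int × Int) :
    ∀ (R : List Int), k.1 ∉ R →
      (R.map (fun r => if k = (r, g r) then (1 : Int) else 0)).sum = 0 := by
  intro R
  induction R with
  | nil => intro _; simp
  | cons r R' ih =>
    intro h
    simp only [List.map_cons, List.sum_cons]
    rw [if_neg (by rintro rfl; exact h (by simp)), ih (by intro hm; exact h (by simp [hm]))]
    ring

-- sum over a nodup R containing k.1 of the indicator "k = (r, g r)"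
lemma sum_ind (g : Int → Int) (k : Int × Int) :
    ∀ (R : List Int), R.Nodup → k.1 ∈ R →
      (R.map (fun r => if k = (r, g r) then (1 : Int) else 0)).sum
        = if k.2 = g k.1 then 1 else 0 := by
  intro R
  induction R with
  | nil => intro _ h; simp at h
  | cons r R' ih =>
    intro hnd hm
    simp only [List.map_cons, List.sum_cons]
    rcases List.mem_cons.mp hm with rfl | hm'
    · rw [sum_ind_zero g k R' (List.nodup_cons.mp hnd).1]
      have : (k = (k.1, g k.1)) ↔ (k.2 = g k.1) := by
        constructor
        · intro h; rw [Prod.ext_iff] at h; exact h.2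
        · intro h; exact Prod.ext rfl h
      simp only [this]
      split_ifs <;> ring
    · have hne : r ≠ k.1 := fun h => (List.nodup_cons.mp hnd).1 (h ▸ hm')
      rw [if_neg (by rintro rfl; exact hne rfl), ih (List.nodup_cons.mp hnd).2 hm']
      ring

-- Σ_{r∈R} count (r, g r) ks = countP (k.2 = g k.1) ks, when every key's first component lies in nodup R
lemma sum_count (g : Int → Int) (R : List Int) (hnd : R.Nodup) :
    ∀ (ks : List (Int × Int)), (∀ k ∈ ks, k.1 ∈ R) →
      (R.map (fun r => (ks.count (r, g r) : Int))).sum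
        = (ks.countP (fun k => decide (k.2 = g k.1)) : Int) := by
  intro ks
  induction ks with
  | nil => intro _; simp
  | cons k ks' ih =>
    intro hmem
    have hsplit : (R.map (fun r => (((k :: ks').count (r, g r)) : Int))).sum
        = (R.map (fun r => (ks'.count (r, g r) : Int))).sum
          + (R.map (fun r => if k = (r, g r) then (1 : Int) else 0)).sum := by
      rw [← List.sum_map_add]
      apply congrArg
      apply List.map_congr_left
      intro r _
      rw [List.count_cons]
      by_cases h : k = (r, g r)
      · simp [h]
      · have : ¬ ((k : Int × Int) == (r, g r)) = true := by simpa using h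
        simp [h, this]
    rw [hsplit, ih (fun x hx => hmem x (by simp [hx])),
        sum_ind g k R hnd (hmem k (by simp))]
    rw [List.countP_cons]
    by_cases h : k.2 = g k.1 <;> simp [h]

-- countP of the mapped enumerate list is the cyclic count (pattern length divides 40)
lemma countP_cyc (pat : List Int) (hL : 0 < pat.length) (hdvd : pat.length ∣ 40) :
    ∀ (xs : List Int) (n : Nat),
      ((((PySem.List.enumerate xs (n : Int)).map
            (fun p => (PySem.Int.mod p.1 40, p.2))).countP
          (fun k => decide (k.2 = PySem.List.pyGetD pat (PySem.Int.mod k.1 (pat.length : Int)) 0))) : Int)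
        = cyc pat (n % pat.length) xs := by
  intro xs
  induction xs with
  | nil => intro n; simp [PySem.List.enumerate_nil, cyc]
  | cons a r ih =>
    intro n
    rw [PySem.List.enumerate_cons]
    have hn1 : (n : Int) + 1 = ((n + 1 : Nat) : Int) := by push_cast; ring
    simp only [List.map_cons, List.countP_cons]
    push_cast
    have hkey : PySem.Int.mod (n : Int) 40 = (((n % 40 : Nat)) : Int) := by
      simpa using mod_natCast_num n 40 (by decide)
    have hget : PySem.List.pyGetD pat (PySem.Int.mod (((n % 40 : Nat)) : Int) (pat.length : Int)) 0
        = pat.getD (n % pat.length) 0 := by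
      rw [mod_natCast_num (n % 40) pat.length hL, PySem.List.pyGetD_natCast,
          Nat.mod_mod_of_dvd n hdvd]
    have hstep : (n + 1) % pat.length = (n % pat.length + 1) % pat.length :=
      (Nat.mod_add_mod n pat.length 1).symm
    have ih' := ih (n + 1)
    push_cast at ih'
    rw [ih']
    simp only [hkey, hget, decide_eq_true_eq]
    rw [hstep]
    simp only [cyc]
    by_cases h : pat.getD (n % pat.length) 0 = a
    · rw [if_pos h.symm, if_pos h]; ring
    · rw [if_neg (fun hh => h hh.symm), if_neg h]; ring

-- each score computed from the histogram equals the cyclic count from offset 0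
lemma scoreB_eq (answers : List Int) (pat : List Int) (hL : 0 < pat.length) (hdvd : pat.length ∣ 40) :
    ((PySem.List.pyRange 0 40 1).map (fun r =>
      (histB answers).getD (r, PySem.List.pyGetD pat (PySem.Int.mod r (pat.length : Int)) 0) 0)).sum
      = cyc pat 0 answers := by
  have h1 : ((PySem.List.pyRange 0 40 1).map (fun r =>
        (histB answers).getD (r, PySem.List.pyGetD pat (PySem.Int.mod r (pat.length : Int)) 0) 0)).sum
      = ((PySem.List.pyRange 0 40 1).map (fun r =>
        ((((PySem.List.enumerate answers 0).map (fun p => (PySem.Int.mod p.1 40, p.2))).count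
            (r, PySem.List.pyGetD pat (PySem.Int.mod r (pat.length : Int)) 0)) : Int))).sum := by
    apply congrArg; apply List.map_congr_left; intro r _; rw [histB_getD]
  have hmem : ∀ k ∈ (PySem.List.enumerate answers 0).map (fun p => (PySem.Int.mod p.1 40, p.2)),
      k.1 ∈ PySem.List.pyRange 0 40 1 := by
    intro k hk
    obtain ⟨p, _, rfl⟩ := List.mem_map.mp hk
    have h40 : (0:Int) < 40 := by decide
    have hm : PySem.Int.mod p.1 40 = p.1 % 40 := PySem.Int.mod_eq_emod_of_pos h40
    rw [PySem.List.mem_pyRange_one]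
    constructor <;> (simp only [hm]; omega)
  rw [h1, sum_count (fun r => PySem.List.pyGetD pat (PySem.Int.mod r (pat.length : Int)) 0)
        (PySem.List.pyRange 0 40 1) (by decide) _ hmem]
  have := countP_cyc pat hL hdvd answers 0
  simp only [Nat.cast_zero, Nat.zero_mod] at this
  exact this

-- ===== VERDICT (by name: the statement is the Claim_ definition above) =====
theorem solution_spec : Claim_equal_solution := by
  intro answers _
  unfold Spec_solution solution solution_alt
  have hA := foldA_eq answers 0 (0, 0, 0)
  simp only [Nat.cast_zero, Nat.zero_mod] at hA
  rw [hA]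
  simp only [List.map, scoreB_eq answers patF (by decide) (by decide),
    scoreB_eq answers patS (by decide) (by decide),
    scoreB_eq answers patT (by decide) (by decide), zero_add]
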